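-- pv_equiv track=rewrite | github.com/piotrhelm/NESTFUL | data_v2/executable_functions/py_code_file_2904.py | search_sorted_time_series
-- ===== SOURCE A (Python) =====
-- from typing import List
--
-- def search_sorted_time_series(array: List[int], timestamp: int) -> int:
--
--     """Searches for a timestamp in a sorted time series array using a binary search algorithm.
--
--
--
--     Args:
--
--         array: A sorted time series array.
--
--         timestamp: The timestamp to search for.
--
--
--
--     Returns:
--
--         The index of the timestamp in the array or `-1` if the timestamp is not found.
--
--     """
--
--     left = 0
--
--     right = len(array) - 1
--
--
--
--     while left <= right:
--
--         mid = (left + right) // 2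
--
--         if array[mid] == timestamp:
--
--             while mid > 0 and array[mid-1] == timestamp:
--
--                 mid -= 1
--
--             return mid
--
--         elif array[mid] > timestamp:
--
--             right = mid - 1
--
--         else:
--
--             left = mid + 1
--
--
--
--     return -1
-- ===== SOURCE B (Python) =====
-- from typing import List
--
-- def search_sorted_time_series(array: List[int], timestamp: int) -> int:
--     """Leftmost binary search (lower bound), then a single membership check."""
--     lo, hi = 0, len(array)
--     while lo < hi:
--         mid = (lo + hi) // 2
--         if array[mid] < timestamp:
--             lo = mid + 1
--         else:
--             hi = mid
--     if lo < len(array) and array[lo] == timestamp: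
--         return lo
--     return -1
-- ===== Notes on version B (the rewrite author's own statement) =====
-- stated objective: faster
-- what changed: Replaced the equality-testing binary search with a linear walk-back over duplicates by a lower-bound binary search followed by one equality check; Pre_ excludes unsorted arrays that contain the timestamp, where the index A returns is an accident of which elements its probes hit (when the timestamp is absent both return -1 even unsorted, so those inputs are kept).
-- outside the precondition, e.g. on search_sorted_time_series([2, 1], 2): A returns 0, B returns -1
import Mathlib
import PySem

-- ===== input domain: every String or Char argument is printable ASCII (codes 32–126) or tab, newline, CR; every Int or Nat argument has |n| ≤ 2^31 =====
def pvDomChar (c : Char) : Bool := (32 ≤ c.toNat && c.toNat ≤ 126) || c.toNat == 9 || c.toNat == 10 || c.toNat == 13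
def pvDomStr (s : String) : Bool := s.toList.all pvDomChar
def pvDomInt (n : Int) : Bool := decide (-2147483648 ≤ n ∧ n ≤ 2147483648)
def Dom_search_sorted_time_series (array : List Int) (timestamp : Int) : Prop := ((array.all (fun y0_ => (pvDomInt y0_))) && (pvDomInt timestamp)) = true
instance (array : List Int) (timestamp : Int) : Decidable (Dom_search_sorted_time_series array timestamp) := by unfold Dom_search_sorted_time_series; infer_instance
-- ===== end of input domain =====

-- B replaces A's equality-testing binary search plus linear walk-back over duplicates
-- by a lower-bound binary search and one final equality check (objective: faster).

-- ===== PORT A =====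
-- inner 'while mid > 0 and array[mid-1] == timestamp: mid -= 1'
def pvWalkA (array : List Int) (timestamp : Int) (mid : Int) : Int :=
  if h : 0 < mid ∧ PySem.List.pyGet? array (mid - 1) = some timestamp then
    pvWalkA array timestamp (mid - 1)
  else mid
termination_by mid.toNat
decreasing_by omega

-- outer 'while left <= right' loop (the 'none' branch is Python's IndexError, never reached
-- from the entry point since 0 ≤ left ≤ mid ≤ right ≤ len-1 throughout)
def pvLoopA (array : List Int) (timestamp : Int) (left right : Int) : Int :=
  if h : left ≤ right then
    let mid := PySem.Int.floordiv (left + right) 2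
    match PySem.List.pyGet? array mid with
    | some v =>
      if v = timestamp then pvWalkA array timestamp mid
      else if v > timestamp then pvLoopA array timestamp left (mid - 1)
      else pvLoopA array timestamp (mid + 1) right
    | none => -1
  else -1
termination_by (right + 1 - left).toNat
decreasing_by
  · have := PySem.Int.floordiv_two_mid_bounds (lo := left) (hi := right) h; omega
  · have := PySem.Int.floordiv_two_mid_bounds (lo := left) (hi := right) h; omega

def search_sorted_time_series (array : List Int) (timestamp : Int) : Int :=
  pvLoopA array timestamp 0 ((array.length : Int) - 1)

-- ===== PORT B =====
-- 'while lo < hi' lower-bound loop ('none' branch = Python's IndexError, never reached: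
-- 0 ≤ lo ≤ mid < hi ≤ len throughout)
def pvLoopB (array : List Int) (timestamp : Int) (lo hi : Int) : Int :=
  if h : lo < hi then
    let mid := PySem.Int.floordiv (lo + hi) 2
    match PySem.List.pyGet? array mid with
    | some v =>
      if v < timestamp then pvLoopB array timestamp (mid + 1) hi
      else pvLoopB array timestamp lo mid
    | none => -1
  else lo
termination_by (hi - lo).toNat
decreasing_by
  · have := PySem.Int.floordiv_two_mid_bounds (lo := lo) (hi := hi) (by omega); omega
  · have h2 : PySem.Int.floordiv (lo + hi) 2 < hi :=
      (PySem.Int.floordiv_lt_iff_lt_mul (by omega)).mpr (by omega)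
    omega

def search_sorted_time_series_alt (array : List Int) (timestamp : Int) : Int :=
  let lo := pvLoopB array timestamp 0 (array.length : Int)
  -- 'if lo < len(array) and array[lo] == timestamp' : pyGet? is none exactly when lo is out of range
  if PySem.List.pyGet? array lo = some timestamp then lo else -1

-- ===== PRECONDITION & SPEC =====
-- Pre_ excludes unsorted arrays that contain the timestamp: the function is specified for a
-- sorted time series, and on unsorted input containing the timestamp the index A returns is an
-- accident of which elements its probes happen to hit (when the timestamp is absent both
-- programs return -1 even on unsorted input, so those inputs are kept).
def Pre_search_sorted_time_series (array : List Int) (timestamp : Int) : Prop :=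
  array.Pairwise (· ≤ ·) ∨ timestamp ∉ array
instance (array : List Int) (timestamp : Int) : Decidable (Pre_search_sorted_time_series array timestamp) := by unfold Pre_search_sorted_time_series; infer_instance

def pvWitness_search_sorted_time_series : List Int × Int := ([1, 2, 2, 3], 2)

def Spec_search_sorted_time_series (array : List Int) (timestamp : Int) (out : Int) : Prop := out = search_sorted_time_series_alt array timestamp
instance (array : List Int) (timestamp : Int) (out : Int) : Decidable (Spec_search_sorted_time_series array timestamp out) := by unfold Spec_search_sorted_time_series; infer_instance

-- ===== CLAIM (what is proved, stated in full; the proofs are below) =====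
def Claim_equal_search_sorted_time_series : Prop := ∀ (array : List Int) (timestamp : Int), Dom_search_sorted_time_series array timestamp → Pre_search_sorted_time_series array timestamp → Spec_search_sorted_time_series array timestamp (search_sorted_time_series array timestamp)

-- ===== LEMMAS AND PROOFS =====

-- r is -1 and timestamp is absent, or r is the first index holding timestamp
def pvIsFirst (a : List Int) (t : Int) (r : Int) : Prop :=
  (r = -1 ∧ ∀ i : Nat, a[i]? ≠ some t) ∨
  (∃ i : Nat, r = (i : Int) ∧ a[i]? = some t ∧ ∀ j : Nat, j < i → a[j]? ≠ some t)

lemma pvIsFirst_unique {a : List Int} {t r₁ r₂ : Int}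
    (h₁ : pvIsFirst a t r₁) (h₂ : pvIsFirst a t r₂) : r₁ = r₂ := by
  rcases h₁ with ⟨e₁, n₁⟩ | ⟨i₁, e₁, g₁, f₁⟩ <;> rcases h₂ with ⟨e₂, n₂⟩ | ⟨i₂, e₂, g₂, f₂⟩
  · omega
  · exact absurd g₂ (n₁ i₂)
  · exact absurd g₁ (n₂ i₁)
  · rcases Nat.lt_trichotomy i₁ i₂ with h | h | h
    · exact absurd g₁ (f₂ i₁ h)
    · omega
    · exact absurd g₂ (f₁ i₂ h)

lemma pvSorted_le {a : List Int} (hs : a.Pairwise (· ≤ ·)) {i j : Nat} {v w : Int}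
    (hij : i ≤ j) (hi : a[i]? = some v) (hj : a[j]? = some w) : v ≤ w := by
  rcases Nat.eq_or_lt_of_le hij with rfl | hlt
  · rw [hi] at hj; injection hj; omega
  · rw [List.getElem?_eq_some_iff] at hi hj
    rcases hi with ⟨hi', rfl⟩; rcases hj with ⟨hj', rfl⟩
    exact (List.pairwise_iff_getElem.mp hs) i j hi' hj' hlt

lemma pvWalkA_spec {a : List Int} {t : Int} (hs : a.Pairwise (· ≤ ·)) :
    ∀ mid : Nat, a[mid]? = some t → pvIsFirst a t (pvWalkA a t (mid : Int)) := by
  intro mid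
  induction mid with
  | zero =>
    intro hm
    rw [pvWalkA, dif_neg]
    · exact Or.inr ⟨0, rfl, hm, by omega⟩
    · rintro ⟨h1, -⟩
      simp at h1
  | succ m ih =>
    intro hm
    rw [pvWalkA]
    have hidx : PySem.List.pyGet? a (((m + 1 : Nat) : Int) - 1) = a[m]? := by
      have : ((m + 1 : Nat) : Int) - 1 = ((m : Nat) : Int) := by push_cast; ring
      rw [this, PySem.List.pyGet?_natCast]
    rw [hidx]
    by_cases hc : a[m]? = some t
    · rw [dif_pos ⟨by push_cast; omega, hc⟩]
      have : ((m + 1 : Nat) : Int) - 1 = ((m : Nat) : Int) := by push_cast; ring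
      rw [this]
      exact ih hc
    · rw [dif_neg (by intro h; exact hc h.2)]
      refine Or.inr ⟨m + 1, rfl, hm, ?_⟩
      intro j hj hjt
      -- a[j] ≤ a[m] < t since a[m] ≠ t and a[m] ≤ a[m+1] = t
      have hmlt : m < a.length := by
        obtain ⟨h, -⟩ := List.getElem?_eq_some_iff.mp hm; omega
      obtain ⟨w, hw⟩ : ∃ w, a[m]? = some w := ⟨a[m], List.getElem?_eq_some_iff.mpr ⟨hmlt, rfl⟩⟩
      have h1 : w ≤ t := pvSorted_le hs (by omega) hw hm
      have h2 : t ≤ w := pvSorted_le hs (by omega) hjt hw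
      exact hc (by rw [hw]; congr 1; omega)

lemma pvLoopA_spec {a : List Int} {t : Int} (hs : a.Pairwise (· ≤ ·)) :
    ∀ n (left right : Int), (right + 1 - left).toNat = n →
      0 ≤ left → right ≤ (a.length : Int) - 1 →
      (∀ (j : Nat) (v : Int), (j : Int) < left → a[j]? = some v → v < t) →
      (∀ (j : Nat) (v : Int), right < (j : Int) → a[j]? = some v → t < v) →
      pvIsFirst a t (pvLoopA a t left right) := by
  intro n
  induction n using Nat.strong_induction_on with
  | _ n ih =>
    intro left right hn hl hr hlow hhigh
    rw [pvLoopA]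
    by_cases hlr : left ≤ right
    · rw [dif_pos hlr]
      have hmid := PySem.Int.floordiv_two_mid_bounds (lo := left) (hi := right) hlr
      set mid := PySem.Int.floordiv (left + right) 2 with hmiddef
      have hmr : 0 ≤ mid ∧ mid < (a.length : Int) := by omega
      have hget : PySem.List.pyGet? a mid = a[mid.toNat]? := by
        have h : mid = ((mid.toNat : Nat) : Int) := by omega
        conv_lhs => rw [h]
        exact PySem.List.pyGet?_natCast ..
      obtain ⟨v, hv⟩ : ∃ v, a[mid.toNat]? = some v :=
        ⟨a[mid.toNat]'(by omega), List.getElem?_eq_some_iff.mpr ⟨by omega, rfl⟩⟩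
      simp only [hget, hv]
      by_cases hvt : v = t
      · rw [if_pos hvt]
        subst hvt
        have : mid = ((mid.toNat : Nat) : Int) := by omega
        rw [this]
        exact pvWalkA_spec hs mid.toNat hv
      · rw [if_neg hvt]
        by_cases hgt : v > t
        · rw [if_pos hgt]
          refine ih (mid - 1 + 1 - left).toNat (by omega) left (mid - 1) rfl hl
            (by omega) hlow ?_
          intro j w hj hw
          have : t ≤ v := le_of_lt hgt
          rcases lt_or_ge (j : Int) (a.length : Int) with hjl | hjl
          · have hvw : v ≤ w := pvSorted_le hs (i := mid.toNat) (by omega) hv hw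
            omega
          · exfalso
            obtain ⟨h, -⟩ := List.getElem?_eq_some_iff.mp hw; omega
        · rw [if_neg hgt]
          refine ih (right + 1 - (mid + 1)).toNat (by omega) (mid + 1) right rfl
            (by omega) hr ?_ hhigh
          intro j w hj hw
          have hwv : w ≤ v := pvSorted_le hs (j := mid.toNat) (by omega) hw hv
          omega
    · rw [dif_neg hlr]
      refine Or.inl ⟨rfl, ?_⟩
      intro i hi
      rcases lt_or_ge (i : Int) left with h | h
      · have := hlow i t h hi; omega
      · have := hhigh i t (by omega) hi; omega

lemma pvLoopB_spec {a : List Int} {t : Int} (hs : a.Pairwise (· ≤ ·)) :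
    ∀ n (lo hi : Int), (hi - lo).toNat = n →
      0 ≤ lo → lo ≤ hi → hi ≤ (a.length : Int) →
      (∀ (j : Nat) (v : Int), (j : Int) < lo → a[j]? = some v → v < t) →
      (∀ (j : Nat) (v : Int), hi ≤ (j : Int) → a[j]? = some v → t ≤ v) →
      ∃ k : Nat, pvLoopB a t lo hi = (k : Int) ∧ (k : Int) ≤ (a.length : Int) ∧
        (∀ (j : Nat) (v : Int), j < k → a[j]? = some v → v < t) ∧
        (∀ (j : Nat) (v : Int), k ≤ j → a[j]? = some v → t ≤ v) := by
  intro n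
  induction n using Nat.strong_induction_on with
  | _ n ih =>
    intro lo hi hn h0 hlh hhl hlow hhigh
    rw [pvLoopB]
    by_cases hlt : lo < hi
    · rw [dif_pos hlt]
      have hmid := PySem.Int.floordiv_two_mid_bounds (lo := lo) (hi := hi) (by omega)
      have hmlt : PySem.Int.floordiv (lo + hi) 2 < hi :=
        (PySem.Int.floordiv_lt_iff_lt_mul (by omega)).mpr (by omega)
      set mid := PySem.Int.floordiv (lo + hi) 2 with hmiddef
      have hget : PySem.List.pyGet? a mid = a[mid.toNat]? := by
        have h : mid = ((mid.toNat : Nat) : Int) := by omega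
        conv_lhs => rw [h]
        exact PySem.List.pyGet?_natCast ..
      obtain ⟨v, hv⟩ : ∃ v, a[mid.toNat]? = some v :=
        ⟨a[mid.toNat]'(by omega), List.getElem?_eq_some_iff.mpr ⟨by omega, rfl⟩⟩
      simp only [hget, hv]
      by_cases hvt : v < t
      · rw [if_pos hvt]
        refine ih (hi - (mid + 1)).toNat (by omega) (mid + 1) hi rfl (by omega)
          (by omega) hhl ?_ hhigh
        intro j w hj hw
        have : w ≤ v := pvSorted_le hs (j := mid.toNat) (by omega) hw hv
        omega
      · rw [if_neg hvt]
        refine ih (mid - lo).toNat (by omega) lo mid rfl h0 (by omega)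
          (by omega) hlow ?_
        intro j w hj hw
        have : v ≤ w := pvSorted_le hs (i := mid.toNat) (by omega) hv hw
        omega
    · rw [dif_neg hlt]
      refine ⟨lo.toNat, by omega, by omega, ?_, ?_⟩
      · intro j v hj hv; exact hlow j v (by omega) hv
      · intro j v hj hv; exact hhigh j v (by omega) hv

lemma pvAlt_isFirst {a : List Int} {t : Int} (hs : a.Pairwise (· ≤ ·)) :
    pvIsFirst a t (search_sorted_time_series_alt a t) := by
  unfold search_sorted_time_series_alt
  obtain ⟨k, hk, hklen, hlow, hhigh⟩ :=
    pvLoopB_spec (a := a) (t := t) hs (a.length : Int).toNat 0 (a.length : Int) (by omega)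
      (by omega) (by omega) (by omega)
      (by intro j v hj _; omega)
      (by intro j v hj hv; exfalso; obtain ⟨h, -⟩ := List.getElem?_eq_some_iff.mp hv; omega)
  show pvIsFirst a t (if PySem.List.pyGet? a (pvLoopB a t 0 (a.length : Int)) = some t
    then pvLoopB a t 0 (a.length : Int) else -1)
  have hget : PySem.List.pyGet? a ((k : Nat) : Int) = a[k]? := PySem.List.pyGet?_natCast ..
  rw [hk, hget]
  by_cases hc : a[k]? = some t
  · rw [if_pos hc]
    exact Or.inr ⟨k, rfl, hc, fun j hj hjt => by have := hlow j t hj hjt; omega⟩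
  · rw [if_neg hc]
    refine Or.inl ⟨rfl, ?_⟩
    intro i hi
    rcases lt_or_ge i k with h | h
    · have := hlow i t h hi; omega
    · -- i ≥ k: then a[k] exists, t ≤ a[k] ≤ a[i] = t, so a[k] = t, contradiction
      obtain ⟨hil, -⟩ := List.getElem?_eq_some_iff.mp hi
      obtain ⟨w, hw⟩ : ∃ w, a[k]? = some w :=
        ⟨a[k]'(by omega), List.getElem?_eq_some_iff.mpr ⟨by omega, rfl⟩⟩
      have h1 : t ≤ w := hhigh k w (by omega) hw
      have h2 : w ≤ t := pvSorted_le hs h hw hi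
      exact hc (by rw [hw]; congr 1; omega)

lemma pvA_isFirst {a : List Int} {t : Int} (hs : a.Pairwise (· ≤ ·)) :
    pvIsFirst a t (search_sorted_time_series a t) := by
  unfold search_sorted_time_series
  exact pvLoopA_spec hs ((a.length : Int)).toNat 0 ((a.length : Int) - 1) (by omega)
    (by omega) (by omega)
    (by intro j v hj _; omega)
    (by intro j v hj hv; exfalso; obtain ⟨h, -⟩ := List.getElem?_eq_some_iff.mp hv; omega)

lemma pvLoopA_notMem {a : List Int} {t : Int} (hnm : t ∉ a) :
    ∀ n (left right : Int), (right + 1 - left).toNat = n → pvLoopA a t left right = -1 := by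
  intro n
  induction n using Nat.strong_induction_on with
  | _ n ih =>
    intro left right hn
    rw [pvLoopA]
    by_cases hlr : left ≤ right
    · rw [dif_pos hlr]
      have hmid := PySem.Int.floordiv_two_mid_bounds (lo := left) (hi := right) hlr
      set mid := PySem.Int.floordiv (left + right) 2 with hmiddef
      cases hg : PySem.List.pyGet? a mid with
      | none => simp only [hg]
      | some v =>
        have hvmem : v ∈ a := PySem.List.mem_of_pyGet?_eq_some a hg
        have hvt : v ≠ t := fun h => hnm (h ▸ hvmem)
        simp only [hg, if_neg hvt]
        by_cases hgt : v > t
        · rw [if_pos hgt]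
          exact ih (mid - 1 + 1 - left).toNat (by omega) left (mid - 1) rfl
        · rw [if_neg hgt]
          exact ih (right + 1 - (mid + 1)).toNat (by omega) (mid + 1) right rfl
    · rw [dif_neg hlr]

lemma pvAlt_notMem {a : List Int} {t : Int} (hnm : t ∉ a) :
    search_sorted_time_series_alt a t = -1 := by
  unfold search_sorted_time_series_alt
  show (if PySem.List.pyGet? a (pvLoopB a t 0 (a.length : Int)) = some t
    then pvLoopB a t 0 (a.length : Int) else -1) = -1
  rw [if_neg]
  intro hg
  exact hnm (PySem.List.mem_of_pyGet?_eq_some a hg)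

-- ===== VERDICT (by name: the statement is the Claim_ definition above) =====
theorem search_sorted_time_series_spec : Claim_equal_search_sorted_time_series := by
  intro array timestamp _ hpre
  unfold Spec_search_sorted_time_series
  rcases hpre with hs | hnm
  · exact pvIsFirst_unique (pvA_isFirst hs) (pvAlt_isFirst hs)
  · rw [pvAlt_notMem hnm]
    exact pvLoopA_notMem hnm _ 0 ((array.length : Int) - 1) rfl
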